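-- pv_equiv track=rewrite | github.com/lee-kangpyo/csv-graph-chat | backend/app/api/sql_generation.py | parse_heatmap_request
-- ===== SOURCE A (Python) =====
-- def parse_heatmap_request(query: str, columns: list[str]) -> dict:
--     query_lower = query.lower()
--
--     x_col = None
--     y_col = None
--     value_col = "count"
--
--     category_cols = [c for c in columns if c.get("data_type") == "category"]
--     date_cols = [c for c in columns if c.get("data_type") == "date"]
--     number_cols = [c for c in columns if c.get("data_type") == "number"]
--
--     if date_cols and category_cols:
--         x_col = date_cols[0]["name"]
--         y_col = category_cols[0]["name"]
--     elif len(category_cols) >= 2: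
--         x_col = category_cols[0]["name"]
--         y_col = category_cols[1]["name"]
--     elif category_cols and number_cols:
--         y_col = category_cols[0]["name"]
--         x_col = number_cols[0]["name"]
--         value_col = "sum"
--
--     return {
--         "operation": "pivot",
--         "x_axis": x_col,
--         "y_axis": y_col,
--         "value": value_col,
--     }
-- ===== SOURCE B (Python) =====
-- def _pick(columns, t, k):
--     """Return the k-th column (0-based) whose data_type is t, or None."""
--     for c in columns:
--         if c.get("data_type") == t:
--             if k == 0:
--                 return c
--             k -= 1
--     return None
--
--
-- def parse_heatmap_request(query: str, columns: list) -> dict: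
--     query.lower()
--
--     # declarative rule table: (x-type, x-index, y-type, y-index, value aggregation)
--     rules = [
--         ("date", 0, "category", 0, "count"),
--         ("category", 0, "category", 1, "count"),
--         ("number", 0, "category", 0, "sum"),
--     ]
--
--     x_col = None
--     y_col = None
--     value_col = "count"
--     for xt, xi, yt, yi, val in rules:
--         x = _pick(columns, xt, xi)
--         y = _pick(columns, yt, yi)
--         if x is not None and y is not None:
--             x_col = x["name"]
--             y_col = y["name"]
--             value_col = val
--             break
--
--     return {
--         "operation": "pivot",
--         "x_axis": x_col,
--         "y_axis": y_col,
--         "value": value_col,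
--     }
-- ===== Notes on version B (the rewrite author's own statement) =====
-- stated objective: alternative
-- what changed: Replaced the three filtering comprehensions and the hand-written branch ladder by a declarative rule table of (x-type, x-index, y-type, y-index, aggregation) tuples scanned in priority order with a generic k-th-column-of-type picker; the first applicable rule wins.
import Mathlib
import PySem

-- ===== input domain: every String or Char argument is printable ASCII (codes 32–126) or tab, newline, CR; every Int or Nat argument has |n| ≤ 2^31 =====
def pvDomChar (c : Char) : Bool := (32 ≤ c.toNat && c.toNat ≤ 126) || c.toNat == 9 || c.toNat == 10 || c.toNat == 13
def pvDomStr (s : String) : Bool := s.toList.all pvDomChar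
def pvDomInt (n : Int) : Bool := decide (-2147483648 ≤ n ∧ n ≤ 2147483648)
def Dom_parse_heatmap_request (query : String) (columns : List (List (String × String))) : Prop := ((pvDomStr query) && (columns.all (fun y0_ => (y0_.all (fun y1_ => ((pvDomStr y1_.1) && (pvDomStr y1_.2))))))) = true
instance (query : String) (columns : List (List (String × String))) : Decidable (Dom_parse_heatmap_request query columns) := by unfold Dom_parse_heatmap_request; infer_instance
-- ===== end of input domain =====

-- B replaces A's three filtering comprehensions and branch ladder by a declarative rule table
-- scanned in priority order with a generic k-th-column-of-type picker (same O(n) cost).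


-- shared helper: Python dict.get on the association-list encoding (first match)
def pvGetK (c : List (String × String)) (k : String) : Option String :=
  (c.find? (fun p => p.1 == k)).map (·.2)

-- ===== PORT A =====
def parse_heatmap_request (query : String) (columns : List (List (String × String))) : List (String × Option String) :=
  let _query_lower := PySem.Str.lower query
  let category_cols := columns.filter (fun c => pvGetK c "data_type" == some "category")
  let date_cols := columns.filter (fun c => pvGetK c "data_type" == some "date")
  let number_cols := columns.filter (fun c => pvGetK c "data_type" == some "number")
  let res :=
    if !date_cols.isEmpty && !category_cols.isEmpty then
      (pvGetK (date_cols.headD []) "name", pvGetK (category_cols.headD []) "name", "count")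
    else if 2 ≤ category_cols.length then
      (pvGetK (category_cols.headD []) "name", pvGetK ((category_cols.drop 1).headD []) "name", "count")
    else if !category_cols.isEmpty && !number_cols.isEmpty then
      (pvGetK (number_cols.headD []) "name", pvGetK (category_cols.headD []) "name", "sum")
    else ((none : Option String), (none : Option String), "count")
  [("operation", some "pivot"), ("x_axis", res.1), ("y_axis", res.2.1), ("value", some res.2.2)]

-- ===== PORT B =====
-- B's generic picker: the k-th column (0-based) whose data_type equals t, else none
def pvPick : List (List (String × String)) → String → Nat → Option (List (String × String))
  | [], _, _ => none
  | c :: rest, t, k =>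
    if pvGetK c "data_type" == some t then
      if k = 0 then some c else pvPick rest t (k - 1)
    else pvPick rest t k

-- B's rule loop: first applicable rule (xt, xi, yt, yi, val) wins
def pvRuleLoop (columns : List (List (String × String))) :
    List (String × Nat × String × Nat × String) → Option String × Option String × String
  | [] => (none, none, "count")
  | (xt, xi, yt, yi, val) :: rest =>
    match pvPick columns xt xi, pvPick columns yt yi with
    | some x, some y => (pvGetK x "name", pvGetK y "name", val)
    | _, _ => pvRuleLoop columns rest

def parse_heatmap_request_alt (query : String) (columns : List (List (String × String))) : List (String × Option String) :=
  let _ := PySem.Str.lower query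
  let rules : List (String × Nat × String × Nat × String) :=
    [("date", 0, "category", 0, "count"),
     ("category", 0, "category", 1, "count"),
     ("number", 0, "category", 0, "sum")]
  let res := pvRuleLoop columns rules
  [("operation", some "pivot"), ("x_axis", res.1), ("y_axis", res.2.1), ("value", some res.2.2)]

-- ===== PRECONDITION & SPEC =====
-- Pre_ excludes inputs containing a column dict typed category/date/number but lacking a "name"
-- key: when such a column is selected by the branch ladder both A and B raise KeyError (on
-- shapes where it is never selected A still returns the default dict, see the cite).
def Pre_parse_heatmap_request (query : String) (columns : List (List (String × String))) : Prop :=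
  ∀ c ∈ columns,
    (pvGetK c "data_type" = some "category" ∨ pvGetK c "data_type" = some "date" ∨
      pvGetK c "data_type" = some "number") → (pvGetK c "name").isSome
instance (query : String) (columns : List (List (String × String))) : Decidable (Pre_parse_heatmap_request query columns) := by unfold Pre_parse_heatmap_request; infer_instance
def pvWitness_parse_heatmap_request : String × (List (List (String × String))) :=
  ("show heatmap", [[("data_type", "category"), ("name", "a")], [("data_type", "date"), ("name", "d")]])
def Spec_parse_heatmap_request (query : String) (columns : List (List (String × String))) (out : List (String × Option String)) : Prop := out = parse_heatmap_request_alt query columns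
instance (query : String) (columns : List (List (String × String))) (out : List (String × Option String)) : Decidable (Spec_parse_heatmap_request query columns out) := by unfold Spec_parse_heatmap_request; infer_instance

-- ===== CLAIM (what is proved, stated in full; the proofs are below) =====
def Claim_equal_parse_heatmap_request : Prop := ∀ (query : String) (columns : List (List (String × String))), Dom_parse_heatmap_request query columns → Pre_parse_heatmap_request query columns → Spec_parse_heatmap_request query columns (parse_heatmap_request query columns)

-- ===== LEMMAS AND PROOFS =====

-- B's picker returns the k-th element of A's corresponding filtered list
theorem pvPick_eq_filter_get (l : List (List (String × String))) (t : String) (k : Nat) :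
    pvPick l t k = (l.filter (fun c => pvGetK c "data_type" == some t))[k]? := by
  induction l generalizing k with
  | nil => simp [pvPick]
  | cons c rest ih =>
    by_cases h : pvGetK c "data_type" = some t
    · cases k with
      | zero => simp [pvPick, h, List.filter_cons]
      | succ k => simp [pvPick, h, List.filter_cons, ih]
    · simp [pvPick, h, List.filter_cons, ih]

-- ===== VERDICT (by name: the statement is the Claim_ definition above) =====
theorem parse_heatmap_request_spec : Claim_equal_parse_heatmap_request := by
  intro query columns _ _
  unfold Spec_parse_heatmap_request parse_heatmap_request parse_heatmap_request_alt
  simp only [pvRuleLoop, pvPick_eq_filter_get]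
  rcases hD : columns.filter (fun c => pvGetK c "data_type" == some "date") with _ | ⟨d0, dl⟩ <;>
    rcases hN : columns.filter (fun c => pvGetK c "data_type" == some "number") with _ | ⟨n0, nl⟩ <;>
    rcases hC : columns.filter (fun c => pvGetK c "data_type" == some "category") with _ | ⟨c0, _ | ⟨c1, cl⟩⟩ <;>
    simp [pvRuleLoop]
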